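-- pv_equiv track=rewrite | github.com/doyle-lab-ucla/auto-qchem | autoqchem/helper_functions.py | add_numbers_to_repeated_items
-- ===== SOURCE A (Python) =====
-- from collections import Counter
--
-- def add_numbers_to_repeated_items(items_list) -> list:
--     """Add numeric consecutive labels to repeated items in a list.
--
--     :param items_list: list of strings
--     :return: list
--     """
--     updated_items_list = []
--
--     counts = Counter(items_list)
--     current_count = {}
--     for item in items_list:
--         if counts[item] > 1:
--             if item not in current_count:
--                 current_count[item] = 1
--             updated_items_list.append(f"{item}{current_count[item]}")
--             current_count[item] = current_count[item] + 1
--         else: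
--             updated_items_list.append(item)
--     return updated_items_list
-- ===== SOURCE B (Python) =====
-- def add_numbers_to_repeated_items(items_list) -> list:
--     """Add numeric consecutive labels to repeated items in a list.
--
--     :param items_list: list of strings
--     :return: list
--     """
--     result = list(items_list)
--     positions = {}
--     for i, x in enumerate(result):
--         positions.setdefault(x, []).append(i)
--     for x, idxs in positions.items():
--         if len(idxs) > 1:
--             for n, i in enumerate(idxs, 1):
--                 result[i] = f"{x}{n}"
--     return result
-- ===== Notes on version B (the rewrite author's own statement) =====
-- stated objective: alternative
-- what changed: Instead of A's Counter plus a running per-item count dict appended item by item, B builds one dict mapping each value to the list of its indices and then overwrites the positions of each repeated group in a copy of the input with f"{item}{n}" for n=1,2,...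
import Mathlib
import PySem

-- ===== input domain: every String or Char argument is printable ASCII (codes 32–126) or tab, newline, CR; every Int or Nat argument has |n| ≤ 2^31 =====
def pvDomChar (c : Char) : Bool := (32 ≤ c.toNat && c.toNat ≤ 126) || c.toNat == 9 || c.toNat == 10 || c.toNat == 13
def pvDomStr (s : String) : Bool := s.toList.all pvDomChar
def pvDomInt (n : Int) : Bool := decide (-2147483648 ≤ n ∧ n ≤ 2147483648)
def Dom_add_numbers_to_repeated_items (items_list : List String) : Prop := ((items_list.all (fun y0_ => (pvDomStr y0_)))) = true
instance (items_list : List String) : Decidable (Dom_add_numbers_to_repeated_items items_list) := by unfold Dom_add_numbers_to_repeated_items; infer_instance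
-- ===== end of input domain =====

-- B replaces A's Counter + running-count loop by a positions dict (value -> list of indices)
-- and overwrites the repeated positions in a copy of the input (objective: alternative; same cost).


-- ===== PORT A =====
-- Loop body of A: state = (updated_items_list, current_count); counts = Counter(items_list).
def addNumStepA (counts : PySem.Dict String Int)
    (st : List String × PySem.Dict String Int) (item : String) :
    List String × PySem.Dict String Int :=
  if counts.getD item 0 > 1 then
    -- if item not in current_count: current_count[item] = 1
    let cc := if st.2.contains item then st.2 else st.2.insert item 1
    -- append f"{item}{current_count[item]}"; current_count[item] += 1
    (st.1 ++ [item ++ PySem.Int.toStr (cc.getD item 0)], cc.insert item (cc.getD item 0 + 1))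
  else
    (st.1 ++ [item], st.2)

def add_numbers_to_repeated_items (items_list : List String) : List String :=
  let counts := PySem.Dict.counter items_list
  (items_list.foldl (addNumStepA counts) ([], PySem.Dict.empty)).1

-- ===== PORT B =====
-- B: result = list(items_list); positions[x] = list of indices of x (setdefault(x, []).append(i));
-- then for each group with len > 1, result[i] = f"{x}{n}" for n, i in enumerate(idxs, 1).
-- result[i] = v is List.set i.toNat v: exact here since every i comes from enumerate(result)
-- and is a valid nonnegative index.
def add_numbers_to_repeated_items_alt (items_list : List String) : List String :=
  -- positions = the setdefault/append loop over enumerate(result); result starts as the input list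
  ((PySem.List.enumerate items_list).foldl
    (fun (d : PySem.Dict String (List Int)) p => d.modify p.2 [] (fun v => v ++ [p.1]))
    PySem.Dict.empty).items.foldl
    (fun res kv =>
      if kv.2.length > 1 then
        (PySem.List.enumerate kv.2 1).foldl
          (fun r q => r.set q.2.toNat (kv.1 ++ PySem.Int.toStr q.1)) res
      else res)
    items_list

-- ===== PRECONDITION & SPEC =====
def Spec_add_numbers_to_repeated_items (items_list : List String) (out : List String) : Prop := out = add_numbers_to_repeated_items_alt items_list
instance (items_list : List String) (out : List String) : Decidable (Spec_add_numbers_to_repeated_items items_list out) := by unfold Spec_add_numbers_to_repeated_items; infer_instance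

-- ===== CLAIM (what is proved, stated in full; the proofs are below) =====
def Claim_equal_add_numbers_to_repeated_items : Prop := ∀ (items_list : List String), Dom_add_numbers_to_repeated_items items_list → Spec_add_numbers_to_repeated_items items_list (add_numbers_to_repeated_items items_list)

-- ===== LEMMAS AND PROOFS =====

-- The common closed form both ports are reduced to: position j of the output is
-- l[j] if l[j] is unique in l, else l[j] ++ str(1 + number of occurrences of l[j] before j).
def pvSpecMap (l : List String) : List String :=
  (PySem.List.enumerate l).map (fun p =>
    if PySem.List.count l p.2 == 1 then p.2
    else p.2 ++ PySem.Int.toStr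
      ((PySem.List.count (PySem.List.slice l (some 0) (some p.1)) p.2 : Int) + 1))

-- ---------- A's loop equals pvSpecMap ----------

-- Loop invariant: after processing prefix `pre` of `l`, the accumulator is the closed-form
-- labels for the positions of `pre`, and current_count holds count_pre(x) + 1 exactly for
-- the items seen in `pre` whose total count in `l` exceeds 1.
theorem addNum_loop (l : List String) (suf pre acc : List String)
    (cc : PySem.Dict String Int)
    (hl : l = pre ++ suf)
    (hacc : acc = (PySem.List.enumerate pre).map (fun p =>
      if PySem.List.count l p.2 == 1 then p.2
      else p.2 ++ PySem.Int.toStr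
        ((PySem.List.count (PySem.List.slice l (some 0) (some p.1)) p.2 : Int) + 1)))
    (hcc : ∀ x, cc.get? x = if 0 < List.count x pre ∧ 1 < List.count x l
        then some ((List.count x pre : Int) + 1) else none) :
    (suf.foldl (addNumStepA (PySem.Dict.counter l)) (acc, cc)).1 =
      (PySem.List.enumerate l).map (fun p =>
        if PySem.List.count l p.2 == 1 then p.2
        else p.2 ++ PySem.Int.toStr
          ((PySem.List.count (PySem.List.slice l (some 0) (some p.1)) p.2 : Int) + 1)) := by
  induction suf generalizing pre acc cc with
  | nil =>
    subst hl
    simp [hacc]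
  | cons x xs ih =>
    have hx1 : 1 ≤ List.count x l := by
      rw [hl, List.count_append, List.count_cons_self]; omega
    have hslice : PySem.List.slice l (some 0) (some ((pre.length : Nat) : Int)) = pre := by
      simp [PySem.List.slice_zero_start, PySem.List.slice_to_natCast, hl]
    have hcount_pre' : ∀ y : String, List.count y (pre ++ [x]) =
        List.count y pre + (if y = x then 1 else 0) := by
      intro y
      rw [List.count_append]
      by_cases hy : y = x
      · subst hy; simp
      · have hxy : ¬ x = y := fun h => hy h.symm
        simp [hy, hxy]
    simp only [List.foldl_cons]
    by_cases hrep : 1 < List.count x l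
    · -- repeated item: A takes the then-branch
      have hne : List.count x l ≠ 1 := by omega
      have hgtD : (PySem.Dict.counter l).getD x 0 > 1 := by
        rw [PySem.Dict.getD_counter]; exact_mod_cast hrep
      by_cases hseen : 0 < List.count x pre
      · -- already in current_count
        have hget : cc.get? x = some ((List.count x pre : Int) + 1) := by
          rw [hcc]; simp [hseen, hrep]
        have hcontains : cc.contains x = true := by
          rw [PySem.Dict.contains_eq_isSome_get?, hget]; rfl
        have hgetD : cc.getD x 0 = (List.count x pre : Int) + 1 := by
          rw [PySem.Dict.getD_eq_get?_getD, hget]; rfl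
        have := ih (pre ++ [x])
          (acc ++ [x ++ PySem.Int.toStr ((List.count x pre : Int) + 1)])
          (cc.insert x ((List.count x pre : Int) + 1 + 1))
          (by rw [hl]; simp)
          (by
            rw [hacc, hl, PySem.List.enumerate_append, List.map_append, ← hl]
            congr 1
            simp only [PySem.List.enumerate, List.map_cons, List.map_nil]
            simp [PySem.List.count_eq, hne, hslice])
          (by
            intro y
            rw [PySem.Dict.get?_insert]
            by_cases hy : y = x
            · subst hy
              have hc : List.count y (pre ++ [y]) = List.count y pre + 1 := by
                simp [hcount_pre' y]
              simp [hc, hrep]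
            · rw [hcc]
              have hc : List.count y (pre ++ [x]) = List.count y pre := by
                simp [hcount_pre' y, hy]
              simp [hy, hc])
        simpa [addNumStepA, hrep, hcontains, hgetD] using this
      · -- first occurrence of a repeated item
        have hget : cc.get? x = none := by rw [hcc]; simp [hseen]
        have hcontains : cc.contains x = false := by
          rw [PySem.Dict.contains_eq_isSome_get?, hget]; rfl
        have hcount0 : List.count x pre = 0 := by omega
        have hgetD1 : (cc.insert x 1).getD x 0 = 1 := by
          rw [PySem.Dict.getD_eq_get?_getD, PySem.Dict.get?_insert_self]; rfl
        have hins2 : (cc.insert x 1).insert x 2 = cc.insert x 2 :=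
          PySem.Dict.insert_insert_self cc x 1 2
        have := ih (pre ++ [x])
          (acc ++ [x ++ PySem.Int.toStr 1])
          (cc.insert x 2)
          (by rw [hl]; simp)
          (by
            rw [hacc, hl, PySem.List.enumerate_append, List.map_append, ← hl]
            congr 1
            simp only [PySem.List.enumerate, List.map_cons, List.map_nil]
            simp [PySem.List.count_eq, hne, hslice, hcount0])
          (by
            intro y
            rw [PySem.Dict.get?_insert]
            by_cases hy : y = x
            · subst hy
              have hc : List.count y (pre ++ [y]) = List.count y pre + 1 := by
                simp [hcount_pre' y]
              simp [hc, hrep, hcount0]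
            · rw [hcc]
              have hc : List.count y (pre ++ [x]) = List.count y pre := by
                simp [hcount_pre' y, hy]
              simp [hy, hc])
        simpa [addNumStepA, hrep, hcontains, hgetD1, hins2] using this
    · -- unique item: count = 1, A takes the else-branch
      have hone : List.count x l = 1 := by omega
      have := ih (pre ++ [x]) (acc ++ [x]) cc
        (by rw [hl]; simp)
        (by
          rw [hacc, hl, PySem.List.enumerate_append, List.map_append, ← hl]
          congr 1
          simp only [PySem.List.enumerate, List.map_cons, List.map_nil]
          simp [PySem.List.count_eq, hone])
        (by
          intro y
          rw [hcc]
          by_cases hy : y = x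
          · subst hy; simp [hone]
          · have hc : List.count y (pre ++ [x]) = List.count y pre := by
              simp [hcount_pre' y, hy]
            simp [hc])
      simpa [addNumStepA, hrep] using this

-- ---------- B's scatter equals pvSpecMap ----------

-- The list of indices (with offset s) at which x occurs in l, in increasing order.
def pvIx (x : String) : List String → Int → List Int
  | [], _ => []
  | a :: t, s => (if a == x then [s] else []) ++ pvIx x t (s + 1)

theorem pvIx_eq_filter (x : String) (l : List String) (s : Int) :
    (((PySem.List.enumerate l s).map Prod.swap).filter (fun p => p.1 == x)).map (·.2) =
      pvIx x l s := by
  induction l generalizing s with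
  | nil => simp [pvIx, PySem.List.enumerate]
  | cons a t ih =>
    rw [PySem.List.enumerate_cons]
    by_cases ha : a = x
    · simp [pvIx, ha, ih]
    · simp [pvIx, ha, ih]

theorem mem_pvIx (x : String) (l : List String) (s t : Int) :
    t ∈ pvIx x l s ↔ ∃ (k : Nat) (h : k < l.length), t = s + k ∧ l[k] = x := by
  induction l generalizing s with
  | nil => simp [pvIx]
  | cons a tl ih =>
    simp only [pvIx, List.mem_append]
    constructor
    · rintro (h | h)
      · by_cases ha : a = x
        · simp [ha] at h
          exact ⟨0, by simp, by simp [h, ha]⟩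
        · simp [ha] at h
      · obtain ⟨k, hk, ht, hx⟩ := (ih (s + 1)).mp h
        exact ⟨k + 1, by simpa using hk, by omega, by simpa using hx⟩
    · rintro ⟨k, hk, ht, hx⟩
      cases k with
      | zero =>
        left
        simp at hx
        simp [hx, ht]
      | succ k =>
        right
        refine (ih (s + 1)).mpr ⟨k, by simpa using hk, by omega, by simpa using hx⟩

theorem length_pvIx (x : String) (l : List String) (s : Int) :
    (pvIx x l s).length = List.count x l := by
  induction l generalizing s with
  | nil => simp [pvIx]
  | cons a t ih =>
    by_cases ha : a = x
    · simp [pvIx, ha, ih]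
    · have hax : (a == x) = false := by simpa using ha
      have hxa : ¬ x = a := fun h => ha h.symm
      simp [pvIx, hax, ih, List.count_cons]

theorem nodup_pvIx (x : String) (l : List String) (s : Int) : (pvIx x l s).Nodup := by
  induction l generalizing s with
  | nil => simp [pvIx]
  | cons a t ih =>
    have hge : ∀ u ∈ pvIx x t (s + 1), s + 1 ≤ u := by
      intro u hu
      obtain ⟨k, _, hu, _⟩ := (mem_pvIx x t (s + 1) u).mp hu
      omega
    by_cases ha : a = x
    · simp only [pvIx, ha]
      simp only [BEq.rfl, if_true]
      refine List.Nodup.cons ?_ (ih (s + 1))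
      intro hs
      have := hge s hs
      omega
    · simp [pvIx, ha, ih (s + 1)]

theorem idxOf_pvIx (x : String) (l : List String) :
    ∀ (s : Int) (j : Nat) (h : j < l.length), l[j] = x →
      List.idxOf (s + (j : Int)) (pvIx x l s) = List.count x (l.take j) := by
  induction l with
  | nil => intro s j h; simp at h
  | cons a t ih =>
    intro s j hj hx
    cases j with
    | zero =>
      simp at hx
      simp [pvIx, hx]
    | succ k =>
      simp at hx
      have hk : k < t.length := by simpa using hj
      have hrec := ih (s + 1) k hk hx
      by_cases ha : a = x
      · have hne : ((s : Int) == s + (k + 1 : Nat)) = false := by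
          simp; omega
        simp only [pvIx, ha, BEq.rfl, if_true, List.singleton_append, List.idxOf_cons, hne,
          cond_false]
        rw [List.take_succ_cons, List.count_cons]
        have : s + ((k + 1 : Nat) : Int) = (s + 1) + (k : Int) := by push_cast; omega
        rw [this, hrec]
        simp
      · have hax : (a == x) = false := by simpa using ha
        have hxa : (x == a) = false := by simp; exact fun h => ha h.symm
        rw [List.take_succ_cons, List.count_cons]
        have hcast : s + ((k + 1 : Nat) : Int) = (s + 1) + (k : Int) := by push_cast; omega
        rw [hcast]
        simp only [pvIx, hax]
        simp [hrec]

-- Inner loop: writing x ++ str(n) at the positions in idxs (labels starting at n0).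
theorem inner_scatter (x : String) (idxs : List Int) :
    ∀ (n0 : Int) (r : List String), idxs.Nodup →
      (∀ t ∈ idxs, 0 ≤ t ∧ t.toNat < r.length) →
      (((PySem.List.enumerate idxs n0).foldl
          (fun r q => r.set q.2.toNat (x ++ PySem.Int.toStr q.1)) r).length = r.length ∧
       ∀ j : Nat,
        ((PySem.List.enumerate idxs n0).foldl
          (fun r q => r.set q.2.toNat (x ++ PySem.Int.toStr q.1)) r)[j]? =
          if (j : Int) ∈ idxs then
            some (x ++ PySem.Int.toStr (n0 + (List.idxOf (j : Int) idxs : Int)))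
          else r[j]?) := by
  induction idxs with
  | nil => intro n0 r _ _; simp [PySem.List.enumerate]
  | cons i rest ih =>
    intro n0 r hnd hbd
    have hi := hbd i (by simp)
    have hndr : rest.Nodup := hnd.of_cons
    have hni : i ∉ rest := by
      have := List.nodup_cons.mp hnd; exact this.1
    have hbd' : ∀ t ∈ rest, 0 ≤ t ∧ t.toNat < (r.set i.toNat (x ++ PySem.Int.toStr n0)).length := by
      intro t ht; simpa [List.length_set] using hbd t (by simp [ht])
    rw [PySem.List.enumerate_cons]
    simp only [List.foldl_cons]
    obtain ⟨ihlen, ihget⟩ := ih (n0 + 1) (r.set i.toNat (x ++ PySem.Int.toStr n0)) hndr hbd'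
    constructor
    · rw [ihlen, List.length_set]
    · intro j
      rw [ihget j]
      by_cases hjr : (j : Int) ∈ rest
      · have hji : (j : Int) ≠ i := fun h => hni (h ▸ hjr)
        have hmem : (j : Int) ∈ i :: rest := by simp [hjr]
        have hidx : List.idxOf (j : Int) (i :: rest) = List.idxOf (j : Int) rest + 1 := by
          have : (i == (j : Int)) = false := by
            simp; exact fun h => hji h.symm
          simp [List.idxOf_cons, this]
        rw [if_pos hjr, if_pos hmem, hidx]
        have harg : n0 + 1 + ((List.idxOf (j : Int) rest : Nat) : Int) =
            n0 + ((List.idxOf (j : Int) rest + 1 : Nat) : Int) := by push_cast; ring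
        rw [harg]
      · by_cases hji : (j : Int) = i
        · have hmem : (j : Int) ∈ i :: rest := by simp [hji]
          have hidx : List.idxOf (j : Int) (i :: rest) = 0 := by
            simp [hji]
          have hjt : i.toNat = j := by omega
          rw [if_neg hjr, if_pos hmem, hidx, List.getElem?_set]
          have hlt' : j < r.length := hjt ▸ hi.2
          simp [hjt, hlt']
        · have hmem : (j : Int) ∉ i :: rest := by simp [hji, hjr]
          have hne : i.toNat ≠ j := by
            intro h; apply hji; omega
          rw [if_neg hjr, if_neg hmem, List.getElem?_set]
          simp [hne]

-- The label the output carries at position j once all groups in `done` are processed.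
def pvLabel (l done : List String) (j : Nat) : String :=
  if l.getD j "" ∈ done ∧ 1 < List.count (l.getD j "") l then
    l.getD j "" ++ PySem.Int.toStr ((List.count (l.getD j "") (l.take j) : Int) + 1)
  else l.getD j ""

theorem pvLabel_congr (l : List String) (d1 d2 : List String) (j : Nat)
    (h : (l.getD j "" ∈ d1) ↔ (l.getD j "" ∈ d2)) : pvLabel l d1 j = pvLabel l d2 j := by
  unfold pvLabel
  by_cases hm : l.getD j "" ∈ d1 <;> by_cases hc : 1 < List.count (l.getD j "") l <;> simp_all

-- Outer loop: processing the groups of the keys in S, one group at a time.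
theorem outer_scatter (l : List String) (S : List String) :
    ∀ (done res : List String),
      res.length = l.length →
      (∀ j : Nat, j < l.length → res[j]? = some (pvLabel l done j)) →
      (((S.map (fun x => (x, pvIx x l 0))).foldl
          (fun res kv =>
            if kv.2.length > 1 then
              (PySem.List.enumerate kv.2 1).foldl
                (fun r q => r.set q.2.toNat (kv.1 ++ PySem.Int.toStr q.1)) res
            else res) res).length = l.length ∧
       ∀ j : Nat, j < l.length →
        ((S.map (fun x => (x, pvIx x l 0))).foldl
          (fun res kv =>
            if kv.2.length > 1 then
              (PySem.List.enumerate kv.2 1).foldl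
                (fun r q => r.set q.2.toNat (kv.1 ++ PySem.Int.toStr q.1)) res
            else res) res)[j]? = some (pvLabel l (done ++ S) j)) := by
  induction S with
  | nil => intro done res hlen hres; simpa using ⟨hlen, hres⟩
  | cons x S' ih =>
    intro done res hlen hres
    simp only [List.map_cons, List.foldl_cons]
    by_cases hgt : (pvIx x l 0).length > 1
    · have hcnt : 1 < List.count x l := by rw [← length_pvIx x l 0]; exact hgt
      obtain ⟨ilen, iget⟩ := inner_scatter x (pvIx x l 0) 1 res (nodup_pvIx x l 0)
        (by
          intro t ht
          obtain ⟨k, hk, ht', _⟩ := (mem_pvIx x l 0 t).mp ht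
          constructor
          · omega
          · rw [hlen]; omega)
      have hres1 : ∀ j : Nat, j < l.length →
          ((PySem.List.enumerate (pvIx x l 0) 1).foldl
            (fun r q => r.set q.2.toNat (x ++ PySem.Int.toStr q.1)) res)[j]? =
            some (pvLabel l (done ++ [x]) j) := by
        intro j hj
        rw [iget j]
        by_cases hjm : (j : Int) ∈ pvIx x l 0
        · obtain ⟨k, hk, hjk, hxk⟩ := (mem_pvIx x l 0 (j : Int)).mp hjm
          have hkj : k = j := by omega
          subst hkj
          have hgd : l.getD k "" = x := by
            rw [List.getD_eq_getElem?_getD, List.getElem?_eq_getElem hk]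
            simpa using hxk
          have hidx : List.idxOf ((k : Int)) (pvIx x l 0) = List.count x (l.take k) := by
            have := idxOf_pvIx x l 0 k hk hxk
            simpa using this
          simp only [hjm, if_true, pvLabel, hgd]
          have hmem : x ∈ done ++ [x] := by simp
          simp only [hmem, true_and, hcnt, if_true]
          rw [hidx]
          congr 2
          ring
        · have hxj : l.getD j "" ≠ x := by
            intro hgd
            apply hjm
            refine (mem_pvIx x l 0 (j : Int)).mpr ⟨j, hj, by simp, ?_⟩
            rw [List.getD_eq_getElem?_getD, List.getElem?_eq_getElem hj] at hgd
            simpa using hgd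
          simp only [hjm, if_false]
          rw [hres j hj]
          exact congrArg some (pvLabel_congr l done (done ++ [x]) j (by simp only [List.mem_append, List.mem_singleton, hxj, or_false]))
      have := ih (done ++ [x])
        ((PySem.List.enumerate (pvIx x l 0) 1).foldl
          (fun r q => r.set q.2.toNat (x ++ PySem.Int.toStr q.1)) res)
        (by rw [ilen, hlen]) hres1
      simpa [hgt] using this
    · have hcnt : ¬ 1 < List.count x l := by rw [← length_pvIx x l 0]; exact hgt
      have hres1 : ∀ j : Nat, j < l.length → res[j]? = some (pvLabel l (done ++ [x]) j) := by
        intro j hj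
        rw [hres j hj]
        refine congrArg some ?_
        by_cases hxj : l.getD j "" = x
        · unfold pvLabel
          rw [hxj]
          simp [hcnt]
        · exact pvLabel_congr l done (done ++ [x]) j (by simp only [List.mem_append, List.mem_singleton, hxj, or_false])
      have := ih (done ++ [x]) res hlen hres1
      simpa [hgt] using this

-- positions.items is exactly the groups (x, pvIx x l 0) over the distinct values of l.
theorem positions_items (l : List String) :
    ((PySem.List.enumerate l).foldl
      (fun (d : PySem.Dict String (List Int)) p => d.modify p.2 [] (fun v => v ++ [p.1]))
      PySem.Dict.empty).items =
      (PySem.Set.ofList l).map (fun x => (x, pvIx x l 0)) := by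
  have hswap : (PySem.List.enumerate l).foldl
      (fun (d : PySem.Dict String (List Int)) p => d.modify p.2 [] (fun v => v ++ [p.1]))
      PySem.Dict.empty =
      ((PySem.List.enumerate l).map Prod.swap).foldl
      (fun (d : PySem.Dict String (List Int)) p => d.modify p.1 [] (fun v => v ++ [p.2]))
      PySem.Dict.empty := by
    rw [List.foldl_map]
    rfl
  have hkeys : ((PySem.List.enumerate l).foldl
      (fun (d : PySem.Dict String (List Int)) p => d.modify p.2 [] (fun v => v ++ [p.1]))
      PySem.Dict.empty).keys = PySem.Set.ofList l := by
    have := PySem.Dict.keys_foldl_modify_key (PySem.List.enumerate l) (fun p => p.2) []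
      (fun _ p => (fun v => v ++ [p.1])) PySem.Dict.empty
    simpa [PySem.List.map_snd_enumerate, PySem.Dict.keys_empty] using this
  have hnd : ((PySem.List.enumerate l).foldl
      (fun (d : PySem.Dict String (List Int)) p => d.modify p.2 [] (fun v => v ++ [p.1]))
      PySem.Dict.empty).keys.Nodup := by
    exact PySem.Dict.nodup_keys_foldl_modify_key (PySem.List.enumerate l) (fun p => p.2) []
      (fun _ p => (fun v => v ++ [p.1])) PySem.Dict.empty PySem.Dict.nodup_keys_empty
  have hgetD : ∀ x, ((PySem.List.enumerate l).foldl
      (fun (d : PySem.Dict String (List Int)) p => d.modify p.2 [] (fun v => v ++ [p.1]))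
      PySem.Dict.empty).getD x [] = pvIx x l 0 := by
    intro x
    rw [hswap]
    rw [PySem.Dict.getD_foldl_modify_append]
    simp [PySem.Dict.getD_empty, pvIx_eq_filter]
  rw [PySem.Dict.items_eq_map_keys _ hnd []]
  rw [hkeys]
  exact List.map_congr_left (fun x _ => by rw [hgetD x])

-- B equals the closed form.
theorem alt_eq_specMap (l : List String) :
    add_numbers_to_repeated_items_alt l = pvSpecMap l := by
  unfold add_numbers_to_repeated_items_alt
  rw [positions_items l]
  obtain ⟨hlen, hget⟩ := outer_scatter l (PySem.Set.ofList l) [] l rfl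
    (by
      intro j hj
      rw [List.getElem?_eq_getElem hj]
      simp [pvLabel, List.getD_eq_getElem?_getD, List.getElem?_eq_getElem hj])
  apply List.ext_getElem?
  intro j
  by_cases hj : j < l.length
  · rw [hget j hj]
    unfold pvSpecMap
    rw [List.getElem?_map, PySem.List.getElem?_enumerate, List.getElem?_eq_getElem hj]
    have hmem : l[j] ∈ l := List.getElem_mem hj
    have hgd : l.getD j "" = l[j] := by
      rw [List.getD_eq_getElem?_getD, List.getElem?_eq_getElem hj]; rfl
    have hsl : PySem.List.slice l (some 0) (some ((0 : Int) + (j : Nat))) = l.take j := by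
      have : ((0 : Int) + (j : Nat)) = ((j : Nat) : Int) := by ring
      rw [this]
      simp [PySem.List.slice_zero_start, PySem.List.slice_to_natCast]
    simp only [Option.map_some]
    unfold pvLabel
    rw [hgd]
    have hc1 : 1 ≤ List.count (l[j]) l := List.one_le_count_iff.mpr hmem
    by_cases hrep : 1 < List.count (l[j]) l
    · have hne : List.count (l[j]) l ≠ 1 := by omega
      have hmem' : l[j] ∈ PySem.Set.ofList l := (PySem.Set.mem_ofList l _).mpr hmem
      simp [hmem', hrep, hne, PySem.List.count_eq]
    · have heq : List.count (l[j]) l = 1 := by omega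
      simp [heq, PySem.List.count_eq]
  · have h1 : (pvSpecMap l).length = l.length := by
      simp [pvSpecMap, PySem.List.length_enumerate]
    rw [List.getElem?_eq_none (by omega), List.getElem?_eq_none (by omega)]

-- ===== VERDICT (by name: the statement is the Claim_ definition above) =====
theorem add_numbers_to_repeated_items_spec : Claim_equal_add_numbers_to_repeated_items := by
  intro items_list _
  unfold Spec_add_numbers_to_repeated_items
  rw [alt_eq_specMap]
  have h := addNum_loop items_list items_list [] [] PySem.Dict.empty (by simp)
    (by simp [PySem.List.enumerate]) (by intro x; simp)
  simpa [add_numbers_to_repeated_items, pvSpecMap] using h
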